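-- pv_equiv track=rewrite | github.com/SeanHomeEnergyConsultations/lumino-app | engine/geo.py | get_parking_ease
-- ===== SOURCE A (Python) =====
-- def get_parking_ease(address):
--     lowered = address.lower()
--     if any(word in lowered for word in ["drive", "court", "circle", "lane", "way"]):
--         return "Good — suburban street"
--     if any(word in lowered for word in ["avenue", "boulevard"]):
--         return "Fair — may have street parking"
--     if "street" in lowered:
--         return "Check first — could be tight"
--     return "Scout first"
-- ===== SOURCE B (Python) =====
-- LABELS = ["Good — suburban street", "Fair — may have street parking",
--           "Check first — could be tight", "Scout first"]
-- G0 = ("drive", "court", "circle", "lane", "way")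
-- G1 = ("avenue", "boulevard")
--
-- def _rank_at(lowered, i):
--     if any(lowered.startswith(w, i) for w in G0):
--         return 0
--     if any(lowered.startswith(w, i) for w in G1):
--         return 1
--     if lowered.startswith("street", i):
--         return 2
--     return 3
--
-- def get_parking_ease(address):
--     lowered = address.lower()
--     best = 3
--     for i in range(len(lowered)):
--         best = min(best, _rank_at(lowered, i))
--     return LABELS[best]
-- ===== Notes on version B (the rewrite author's own statement) =====
-- stated objective: alternative
-- what changed: Instead of three substring-membership passes in an if-cascade, B makes a single left-to-right scan over the character positions of the lowered address, computing at each position the priority rank of any keyword starting there and keeping the minimum rank, then indexes the label table with it.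
import Mathlib
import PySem

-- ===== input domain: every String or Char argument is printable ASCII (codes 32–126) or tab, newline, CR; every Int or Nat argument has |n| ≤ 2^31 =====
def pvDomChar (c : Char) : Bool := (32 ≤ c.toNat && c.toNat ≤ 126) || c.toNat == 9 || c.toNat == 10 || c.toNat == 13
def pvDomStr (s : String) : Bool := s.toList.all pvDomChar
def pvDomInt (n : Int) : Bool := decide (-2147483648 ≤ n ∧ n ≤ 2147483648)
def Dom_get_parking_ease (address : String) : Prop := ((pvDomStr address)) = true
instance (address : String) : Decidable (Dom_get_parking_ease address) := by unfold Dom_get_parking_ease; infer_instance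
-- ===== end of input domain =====

-- B replaces A's substring-membership if-cascade by a single scan over character positions
-- that keeps the minimum priority rank of any keyword starting at each position (objective: alternative).

-- ===== PORT A =====
def get_parking_ease (address : String) : String :=
  let lowered := PySem.Str.lower address
  if ["drive", "court", "circle", "lane", "way"].any (fun word => PySem.Str.isIn word lowered) then
    "Good — suburban street"
  else if ["avenue", "boulevard"].any (fun word => PySem.Str.isIn word lowered) then
    "Fair — may have street parking"
  else if PySem.Str.isIn "street" lowered then
    "Check first — could be tight"
  else "Scout first"

-- ===== PORT B =====
def pkLabels : List String :=
  ["Good — suburban street", "Fair — may have street parking",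
   "Check first — could be tight", "Scout first"]
def pkG0 : List String := ["drive", "court", "circle", "lane", "way"]
def pkG1 : List String := ["avenue", "boulevard"]

-- _rank_at(lowered, i); Python's lowered.startswith(w, i) with 0 ≤ i ≤ len is startswith on the drop
def pkRankAt (cs : List Char) (i : Nat) : Nat :=
  if pkG0.any (fun w => PySem.Chars.startswith (cs.drop i) w.toList) then 0
  else if pkG1.any (fun w => PySem.Chars.startswith (cs.drop i) w.toList) then 1
  else if PySem.Chars.startswith (cs.drop i) "street".toList then 2
  else 3

def get_parking_ease_alt (address : String) : String :=
  let cs := (PySem.Str.lower address).toList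
  let best := (List.range cs.length).foldl (fun b i => min b (pkRankAt cs i)) 3
  (PySem.List.pyGet? pkLabels (best : Int)).get!

-- ===== PRECONDITION & SPEC =====
def Spec_get_parking_ease (address : String) (out : String) : Prop := out = get_parking_ease_alt address
instance (address : String) (out : String) : Decidable (Spec_get_parking_ease address out) := by unfold Spec_get_parking_ease; infer_instance

-- ===== CLAIM (what is proved, stated in full; the proofs are below) =====
def Claim_equal_get_parking_ease : Prop := ∀ (address : String), Dom_get_parking_ease address → Spec_get_parking_ease address (get_parking_ease address)

-- ===== LEMMAS AND PROOFS =====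

theorem pk_foldl_min_le_init (l : List Nat) (a : Nat) : l.foldl min a ≤ a := by
  induction l generalizing a with
  | nil => exact le_refl a
  | cons x l ih => exact le_trans (ih (min a x)) (min_le_left a x)

theorem pk_foldl_min_le_mem (l : List Nat) (a x : Nat) (hx : x ∈ l) : l.foldl min a ≤ x := by
  induction l generalizing a with
  | nil => cases hx
  | cons y l ih =>
      rcases List.mem_cons.mp hx with h | h
      · subst h; exact le_trans (pk_foldl_min_le_init l (min a x)) (min_le_right a x)
      · exact ih (min a y) h

theorem pk_le_foldl_min (l : List Nat) (a b : Nat) (ha : b ≤ a) (hl : ∀ x ∈ l, b ≤ x) :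
    b ≤ l.foldl min a := by
  induction l generalizing a with
  | nil => exact ha
  | cons y l ih =>
      exact ih (min a y) (le_min ha (hl y (List.mem_cons_self)))
        (fun x hx => hl x (List.mem_cons_of_mem y hx))

-- 'w in cs' ⟺ w starts at some position i < |cs| (for nonempty w)
theorem pk_isIn_iff_exists_start (cs : List Char) (w : String) (hw : w.toList ≠ []) :
    PySem.Chars.isIn w.toList cs = true ↔
      ∃ i, i < cs.length ∧ PySem.Chars.startswith (cs.drop i) w.toList = true := by
  constructor
  · intro h
    obtain ⟨j, hj⟩ := (PySem.Chars.exists_prefix_drop_iff_isIn w.toList cs).mpr h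
    refine ⟨j, ?_, (PySem.Chars.startswith_iff _ _).mpr hj⟩
    by_contra hlen
    have hnil : cs.drop j = [] := List.drop_eq_nil_of_le (by omega)
    rw [hnil] at hj
    exact hw (List.prefix_nil.mp hj)
  · rintro ⟨i, _, h⟩
    exact (PySem.Chars.exists_prefix_drop_iff_isIn w.toList cs).mp
      ⟨i, (PySem.Chars.startswith_iff _ _).mp h⟩

-- group-level version: some word of G occurs in cs ⟺ some word of G starts at some i < |cs|
theorem pk_group_iff (cs : List Char) (G : List String) (hG : ∀ w ∈ G, w.toList ≠ []) :
    G.any (fun w => PySem.Chars.isIn w.toList cs) = true ↔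
      ∃ i, i < cs.length ∧ G.any (fun w => PySem.Chars.startswith (cs.drop i) w.toList) = true := by
  simp only [List.any_eq_true]
  constructor
  · rintro ⟨w, hwG, hw⟩
    obtain ⟨i, hi, hs⟩ := (pk_isIn_iff_exists_start cs w (hG w hwG)).mp hw
    exact ⟨i, hi, w, hwG, hs⟩
  · rintro ⟨i, hi, w, hwG, hs⟩
    exact ⟨w, hwG, (pk_isIn_iff_exists_start cs w (hG w hwG)).mpr ⟨i, hi, hs⟩⟩

-- the scanned minimum rank equals the cascade of the three membership tests
theorem pk_best_eq (cs : List Char) :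
    (List.range cs.length).foldl (fun b i => min b (pkRankAt cs i)) 3 =
      (if pkG0.any (fun w => PySem.Chars.isIn w.toList cs) then (0 : Nat)
       else if pkG1.any (fun w => PySem.Chars.isIn w.toList cs) then 1
       else if PySem.Chars.isIn "street".toList cs then 2
       else 3) := by
  have hfold : (List.range cs.length).foldl (fun b i => min b (pkRankAt cs i)) 3
      = ((List.range cs.length).map (pkRankAt cs)).foldl min 3 := List.foldl_map.symm
  have hmem : ∀ i, i < cs.length → pkRankAt cs i ∈ (List.range cs.length).map (pkRankAt cs) :=
    fun i hi => List.mem_map.mpr ⟨i, List.mem_range.mpr hi, rfl⟩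
  have hall : ∀ x ∈ (List.range cs.length).map (pkRankAt cs), ∃ i, i < cs.length ∧ x = pkRankAt cs i := by
    intro x hx
    obtain ⟨i, hi, hxi⟩ := List.mem_map.mp hx
    exact ⟨i, List.mem_range.mp hi, hxi.symm⟩
  rw [hfold]
  by_cases h0 : pkG0.any (fun w => PySem.Chars.isIn w.toList cs) = true
  · rw [if_pos h0]
    obtain ⟨i, hi, hs⟩ := (pk_group_iff cs pkG0 (by decide)).mp h0
    have hr : pkRankAt cs i = 0 := by unfold pkRankAt; rw [if_pos hs]
    exact Nat.le_zero.mp (hr ▸ pk_foldl_min_le_mem _ _ _ (hmem i hi))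
  · rw [if_neg h0]
    have h0' : ∀ i, i < cs.length → ¬ pkG0.any (fun w => PySem.Chars.startswith (cs.drop i) w.toList) = true := by
      intro i hi hc
      exact h0 ((pk_group_iff cs pkG0 (by decide)).mpr ⟨i, hi, hc⟩)
    by_cases h1 : pkG1.any (fun w => PySem.Chars.isIn w.toList cs) = true
    · rw [if_pos h1]
      obtain ⟨i, hi, hs⟩ := (pk_group_iff cs pkG1 (by decide)).mp h1
      have hr : pkRankAt cs i = 1 := by
        unfold pkRankAt; rw [if_neg (h0' i hi), if_pos hs]
      have hub : ((List.range cs.length).map (pkRankAt cs)).foldl min 3 ≤ 1 :=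
        hr ▸ pk_foldl_min_le_mem _ _ _ (hmem i hi)
      have hlb : 1 ≤ ((List.range cs.length).map (pkRankAt cs)).foldl min 3 := by
        refine pk_le_foldl_min _ _ _ (by omega) ?_
        intro x hx
        obtain ⟨i, hi, hxi⟩ := hall x hx
        subst hxi
        unfold pkRankAt
        rw [if_neg (h0' i hi)]
        split_ifs <;> omega
      omega
    · rw [if_neg h1]
      have h1' : ∀ i, i < cs.length → ¬ pkG1.any (fun w => PySem.Chars.startswith (cs.drop i) w.toList) = true := by
        intro i hi hc
        exact h1 ((pk_group_iff cs pkG1 (by decide)).mpr ⟨i, hi, hc⟩)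
      by_cases h2 : PySem.Chars.isIn "street".toList cs = true
      · rw [if_pos h2]
        obtain ⟨i, hi, hs⟩ := (pk_isIn_iff_exists_start cs "street" (by decide)).mp h2
        have hr : pkRankAt cs i = 2 := by
          unfold pkRankAt; rw [if_neg (h0' i hi), if_neg (h1' i hi), if_pos hs]
        have hub : ((List.range cs.length).map (pkRankAt cs)).foldl min 3 ≤ 2 :=
          hr ▸ pk_foldl_min_le_mem _ _ _ (hmem i hi)
        have hlb : 2 ≤ ((List.range cs.length).map (pkRankAt cs)).foldl min 3 := by
          refine pk_le_foldl_min _ _ _ (by omega) ?_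
          intro x hx
          obtain ⟨i, hi, hxi⟩ := hall x hx
          subst hxi
          unfold pkRankAt
          rw [if_neg (h0' i hi), if_neg (h1' i hi)]
          split_ifs <;> omega
        omega
      · rw [if_neg h2]
        have h2' : ∀ i, i < cs.length → ¬ PySem.Chars.startswith (cs.drop i) "street".toList = true := by
          intro i hi hc
          exact h2 ((pk_isIn_iff_exists_start cs "street" (by decide)).mpr ⟨i, hi, hc⟩)
        have hlb : 3 ≤ ((List.range cs.length).map (pkRankAt cs)).foldl min 3 := by
          refine pk_le_foldl_min _ _ _ (le_refl 3) ?_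
          intro x hx
          obtain ⟨i, hi, hxi⟩ := hall x hx
          subst hxi
          unfold pkRankAt
          rw [if_neg (h0' i hi), if_neg (h1' i hi), if_neg (h2' i hi)]
        have hub := pk_foldl_min_le_init ((List.range cs.length).map (pkRankAt cs)) 3
        omega

-- ===== VERDICT (by name: the statement is the Claim_ definition above) =====
theorem get_parking_ease_spec : Claim_equal_get_parking_ease := by
  intro address _
  unfold Spec_get_parking_ease get_parking_ease get_parking_ease_alt
  simp only []
  set cs := (PySem.Str.lower address).toList with hcs
  rw [pk_best_eq cs]
  simp only [PySem.Str.isIn_eq, ← hcs, pkG0, pkG1, List.any_cons, List.any_nil]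
  split_ifs <;> rfl
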